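-- pv_equiv track=rewrite | github.com/pypi-data/pypi-mirror-401 | packages/tenets/tenets-0.10.0-py3-none-any.whl/tenets/core/analysis/implementations/javascript_analyzer.py | _parse_js_params
-- ===== SOURCE A (Python) =====
-- from typing import Any, Dict, List, Optional, Set
--
-- def _parse_js_params(params_str: str) -> List[str]:
--     """Parse JavaScript function parameters.
--
--     Handles default parameters, rest parameters, and TypeScript types.
--
--     Args:
--         params_str: Parameter string from function signature
--
--     Returns:
--         List of parameter names
--     """
--     if not params_str.strip():
--         return []
--
--     params = []
--     depth = 0
--     current_param = ""
--
--     # Handle nested structures in default values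
--     for char in params_str:
--         if char in "({[":
--             depth += 1
--         elif char in ")}]":
--             depth -= 1
--         elif char == "," and depth == 0:
--             param = current_param.strip()
--             if param:
--                 # Extract parameter name
--                 param_name = param.split("=")[0].split(":")[0].strip()
--                 params.append(param_name)
--             current_param = ""
--             continue
--
--         current_param += char
--
--     # Add last parameter
--     if current_param.strip():
--         param_name = current_param.strip().split("=")[0].split(":")[0].strip()
--         params.append(param_name)
--
--     return params
-- ===== SOURCE B (Python) =====
-- from typing import List
--
--
-- def _parse_js_params(params_str: str) -> List[str]:
--     # Pass 1: record the index of every comma that sits outside all brackets.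
--     cuts = [-1]
--     depth = 0
--     for i, ch in enumerate(params_str):
--         if ch == "," and depth == 0:
--             cuts.append(i)
--         elif ch in "({[":
--             depth += 1
--         elif ch in ")}]":
--             depth -= 1
--     cuts.append(len(params_str))
--     # Pass 2: slice the string between consecutive cut positions, then extract each name.
--     names = []
--     for lo, hi in zip(cuts, cuts[1:]):
--         seg = params_str[lo + 1:hi].strip()
--         if seg:
--             names.append(seg.split("=")[0].split(":")[0].strip())
--     return names
-- ===== Notes on version B (the rewrite author's own statement) =====
-- stated objective: alternative
-- what changed: B never accumulates parameter text: pass 1 records only the integer positions of top-level commas (depth counter, no buffer, no output list), and pass 2 reconstructs each parameter by slicing the original string between consecutive cut positions before extracting the name; A builds each parameter character-by-character in a buffer and emits names inline during the single scan, with a separate whole-string-blank guard and a trailing-buffer epilogue that B's index/slice formulation does not need.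
import Mathlib
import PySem

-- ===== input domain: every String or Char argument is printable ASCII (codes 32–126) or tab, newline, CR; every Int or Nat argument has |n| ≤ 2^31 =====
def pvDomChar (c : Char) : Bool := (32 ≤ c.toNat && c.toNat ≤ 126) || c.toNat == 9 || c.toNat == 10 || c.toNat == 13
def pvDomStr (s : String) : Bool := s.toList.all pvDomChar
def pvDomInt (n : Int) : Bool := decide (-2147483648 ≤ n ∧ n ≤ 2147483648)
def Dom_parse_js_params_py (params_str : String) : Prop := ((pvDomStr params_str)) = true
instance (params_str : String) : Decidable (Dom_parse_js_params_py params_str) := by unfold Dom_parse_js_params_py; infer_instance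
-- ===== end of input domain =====

-- B replaces A's buffer-accumulating single scan by pass 1 recording only integer cut positions
-- and pass 2 slicing the original string between them (objective: alternative decomposition, same cost).


-- ===== PORT A =====
-- param.split("=")[0].split(":")[0].strip()  (sub-expression both Pythons contain verbatim)
def pvNameOf (p : List Char) : String :=
  String.ofList (PySem.Chars.strip ((PySem.Chars.splitOn ((PySem.Chars.splitOn p ['=']).headD []) [':']).headD []))

-- one iteration of A's for-loop over (params, depth, current_param)
def pvStepA (st : List String × Int × List Char) (c : Char) : List String × Int × List Char :=
  match st with
  | (params, depth, cur) =>
    if c = '(' ∨ c = '{' ∨ c = '[' then (params, depth + 1, cur ++ [c])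
    else if c = ')' ∨ c = '}' ∨ c = ']' then (params, depth - 1, cur ++ [c])
    else if c = ',' ∧ depth = 0 then
      let p := PySem.Chars.strip cur
      ((if p ≠ [] then params ++ [pvNameOf p] else params), depth, [])
    else (params, depth, cur ++ [c])

def parse_js_params_py (params_str : String) : List String :=
  if PySem.Str.strip params_str = "" then []
  else
    let st := params_str.toList.foldl pvStepA ([], 0, [])
    if PySem.Chars.strip st.2.2 ≠ [] then st.1 ++ [pvNameOf (PySem.Chars.strip st.2.2)]
    else st.1

-- ===== PORT B =====
-- pass 1: one iteration over enumerate(params_str), state (depth, cuts)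
def pvStep1 (st : Int × List Int) (ic : Int × Char) : Int × List Int :=
  match st, ic with
  | (depth, cuts), (i, c) =>
    if c = ',' ∧ depth = 0 then (depth, cuts ++ [i])
    else if c = '(' ∨ c = '{' ∨ c = '[' then (depth + 1, cuts)
    else if c = ')' ∨ c = '}' ∨ c = ']' then (depth - 1, cuts)
    else (depth, cuts)

-- pass 2: 'for lo, hi in zip(cuts, cuts[1:]): …' over the full string
def pvOut (full : List Char) (ps : List (Int × Int)) : List String :=
  ps.foldl
    (fun names p =>
      let seg := PySem.Chars.strip (PySem.List.slice full (some (p.1 + 1)) (some p.2))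
      if seg ≠ [] then names ++ [pvNameOf seg] else names) []

def parse_js_params_py_alt (params_str : String) : List String :=
  let cs := params_str.toList
  let st := (PySem.List.enumerate cs 0).foldl pvStep1 (0, [-1])
  let cuts := st.2 ++ [(cs.length : Int)]
  pvOut cs (cuts.zip cuts.tail)

-- ===== PRECONDITION & SPEC =====
def Spec_parse_js_params_py (params_str : String) (out : List String) : Prop := out = parse_js_params_py_alt params_str
instance (params_str : String) (out : List String) : Decidable (Spec_parse_js_params_py params_str out) := by unfold Spec_parse_js_params_py; infer_instance

-- ===== CLAIM (what is proved, stated in full; the proofs are below) =====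
def Claim_equal_parse_js_params_py : Prop := ∀ (params_str : String), Dom_parse_js_params_py params_str → Spec_parse_js_params_py params_str (parse_js_params_py params_str)

-- ===== LEMMAS AND PROOFS =====

lemma pvOut_aux (full : List Char) (ps : List (Int × Int)) : ∀ acc, ps.foldl
    (fun names p =>
      let seg := PySem.Chars.strip (PySem.List.slice full (some (p.1 + 1)) (some p.2))
      if seg ≠ [] then names ++ [pvNameOf seg] else names) acc =
    acc ++ ps.filterMap (fun p =>
      let seg := PySem.Chars.strip (PySem.List.slice full (some (p.1 + 1)) (some p.2))
      if seg ≠ [] then some (pvNameOf seg) else none) := by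
  induction ps with
  | nil => simp
  | cons p ps ih =>
    intro acc
    simp only [List.foldl_cons, List.filterMap_cons]
    split_ifs with h <;> simp_all

lemma pvOut_append_one (full : List Char) (ps : List (Int × Int)) (p : Int × Int) :
    pvOut full (ps ++ [p]) =
      pvOut full ps ++
        (let seg := PySem.Chars.strip (PySem.List.slice full (some (p.1 + 1)) (some p.2))
         if seg ≠ [] then [pvNameOf seg] else []) := by
  simp only [pvOut, pvOut_aux, List.filterMap_append, List.filterMap_cons, List.filterMap_nil]
  split_ifs <;> simp

-- adjacent pairs of (l ++ [x]) = adjacent pairs of l plus the closing pair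
lemma pvZip_last (l : List Int) (k x : Int) (h : l.getLast? = some k) :
    (l ++ [x]).zip ((l ++ [x]).tail) = l.zip l.tail ++ [(k, x)] := by
  induction l with
  | nil => simp at h
  | cons a l ih =>
    cases l with
    | nil => simp_all
    | cons b l =>
      simp only [List.getLast?_cons_cons] at h
      simpa using ih h

-- the accumulated buffer, extended by one character, is the next prefix's tail slice
lemma pvCurExt (full : List Char) (c : Char) (cs : List Char) (n m : Nat)
    (hd : full.drop n = c :: cs) (hm : m ≤ n) :
    (full.take n).drop m ++ [c] = (full.take (n + 1)).drop m := by
  have hlen : n < full.length := by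
    by_contra h
    rw [List.drop_eq_nil_of_le (le_of_not_gt h)] at hd
    exact (List.cons_ne_nil _ _) hd.symm
  have hc : full[n]? = some c := by
    have h0 := List.getElem?_drop (xs := full) (i := n) (j := 0)
    rw [hd] at h0
    simpa using h0.symm
  rw [List.take_add_one, hc]
  simp only [Option.toList_some]
  rw [List.drop_append_of_le_length (by simp [List.length_take]; omega)]

-- lock-step invariant: A's fold over the suffix vs B's pass-1 fold over the same (enumerated) suffix
lemma pvLockstep (full : List Char) : ∀ (cs : List Char) (n : Nat) (depth : Int) (cuts : List Int) (k : Int),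
    full.drop n = cs → cuts.getLast? = some k → 0 ≤ k + 1 → (k + 1).toNat ≤ n →
    ∃ (k' : Int) (S : Int × List Int),
      (PySem.List.enumerate cs (n : Int)).foldl pvStep1 (depth, cuts) = S
      ∧ S.2.getLast? = some k' ∧ 0 ≤ k' + 1 ∧ (k' + 1).toNat ≤ n + cs.length
      ∧ cs.foldl pvStepA (pvOut full (cuts.zip cuts.tail), depth, (full.take n).drop (k + 1).toNat)
          = (pvOut full (S.2.zip S.2.tail), S.1, (full.take (n + cs.length)).drop (k' + 1).toNat) := by
  intro cs
  induction cs with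
  | nil =>
    intro n depth cuts k hd hk h0 hn
    exact ⟨k, (depth, cuts), by simp [PySem.List.enumerate], hk, h0, by simpa using hn, by simp⟩
  | cons c cs ih =>
    intro n depth cuts k hd hk h0 hn
    have hn' : full.drop (n + 1) = cs := by
      have := congrArg List.tail hd; simpa [List.tail_drop] using this
    rw [PySem.List.enumerate_cons]
    simp only [List.foldl_cons]
    rw [show ((n : Int) + 1) = ((n + 1 : Nat) : Int) by push_cast; ring]
    by_cases h1 : c = '(' ∨ c = '{' ∨ c = '['
    · have hnc : ¬ (c = ',' ∧ depth = 0) := by rcases h1 with rfl | rfl | rfl <;> simp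
      rw [show pvStepA (pvOut full (cuts.zip cuts.tail), depth, (full.take n).drop (k + 1).toNat) c
            = (pvOut full (cuts.zip cuts.tail), depth + 1, (full.take (n+1)).drop (k + 1).toNat) from by
          simp only [pvStepA, if_pos h1]
          rw [pvCurExt full c cs n _ hd hn]]
      rw [show pvStep1 (depth, cuts) ((n : Int), c) = (depth + 1, cuts) from by
          simp only [pvStep1, if_neg hnc, if_pos h1]]
      obtain ⟨k', S, hS, a, b, cle, e⟩ := ih (n + 1) (depth + 1) cuts k hn' hk h0 (by omega)
      refine ⟨k', S, hS, a, b, by simp only [List.length_cons]; omega, ?_⟩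
      simp only [List.length_cons]
      rw [show n + (cs.length + 1) = n + 1 + cs.length by omega]
      exact e
    · by_cases h2 : c = ')' ∨ c = '}' ∨ c = ']'
      · have hnc : ¬ (c = ',' ∧ depth = 0) := by rcases h2 with rfl | rfl | rfl <;> simp
        rw [show pvStepA (pvOut full (cuts.zip cuts.tail), depth, (full.take n).drop (k + 1).toNat) c
              = (pvOut full (cuts.zip cuts.tail), depth - 1, (full.take (n+1)).drop (k + 1).toNat) from by
            simp only [pvStepA, if_neg h1, if_pos h2]
            rw [pvCurExt full c cs n _ hd hn]]
        rw [show pvStep1 (depth, cuts) ((n : Int), c) = (depth - 1, cuts) from by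
            simp only [pvStep1, if_neg hnc, if_neg h1, if_pos h2]]
        obtain ⟨k', S, hS, a, b, cle, e⟩ := ih (n + 1) (depth - 1) cuts k hn' hk h0 (by omega)
        refine ⟨k', S, hS, a, b, by simp only [List.length_cons]; omega, ?_⟩
        simp only [List.length_cons]
        rw [show n + (cs.length + 1) = n + 1 + cs.length by omega]
        exact e
      · by_cases h3 : c = ',' ∧ depth = 0
        · have hseg : PySem.Chars.strip ((full.take n).drop (k + 1).toNat)
              = PySem.Chars.strip (PySem.List.slice full (some (k + 1)) (some (n : Int))) := by
            rw [PySem.List.slice_toNat full h0 (by positivity), List.drop_take]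
            simp
          rw [show pvStepA (pvOut full (cuts.zip cuts.tail), depth, (full.take n).drop (k + 1).toNat) c
                = (pvOut full ((cuts ++ [(n : Int)]).zip (cuts ++ [(n : Int)]).tail), depth, []) from by
              simp only [pvStepA, if_neg h1, if_neg h2, if_pos h3]
              rw [pvZip_last cuts k (n : Int) hk, pvOut_append_one]
              simp only [hseg]
              split_ifs <;> simp_all]
          rw [show pvStep1 (depth, cuts) ((n : Int), c) = (depth, cuts ++ [(n : Int)]) from by
              simp only [pvStep1, if_pos h3]]
          rw [show ([] : List Char) = (full.take (n+1)).drop (((n : Int) + 1).toNat) from by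
            rw [eq_comm, List.drop_eq_nil_iff]
            simp [List.length_take]]
          obtain ⟨k', S, hS, a, b, cle, e⟩ := ih (n + 1) depth (cuts ++ [(n : Int)]) (n : Int) hn'
            (by simp) (by positivity) (by omega)
          refine ⟨k', S, hS, a, b, by simp only [List.length_cons]; omega, ?_⟩
          simp only [List.length_cons]
          rw [show n + (cs.length + 1) = n + 1 + cs.length by omega]
          exact e
        · rw [show pvStepA (pvOut full (cuts.zip cuts.tail), depth, (full.take n).drop (k + 1).toNat) c
                = (pvOut full (cuts.zip cuts.tail), depth, (full.take (n+1)).drop (k + 1).toNat) from by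
              simp only [pvStepA, if_neg h1, if_neg h2, if_neg h3]
              rw [pvCurExt full c cs n _ hd hn]]
          rw [show pvStep1 (depth, cuts) ((n : Int), c) = (depth, cuts) from by
              simp only [pvStep1, if_neg h3, if_neg h1, if_neg h2]]
          obtain ⟨k', S, hS, a, b, cle, e⟩ := ih (n + 1) depth cuts k hn' hk h0 (by omega)
          refine ⟨k', S, hS, a, b, by simp only [List.length_cons]; omega, ?_⟩
          simp only [List.length_cons]
          rw [show n + (cs.length + 1) = n + 1 + cs.length by omega]
          exact e

-- all-whitespace strings leave pass 1's state untouched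
lemma pvFold_ws (l : List (Int × Char)) : ∀ (depth : Int) (cuts : List Int),
    (∀ p ∈ l, PySem.Chars.isspace p.2 = true) →
    l.foldl pvStep1 (depth, cuts) = (depth, cuts) := by
  induction l with
  | nil => intro depth cuts _; rfl
  | cons p l ih =>
    intro depth cuts h
    have hc : PySem.Chars.isspace p.2 = true := h p (by simp)
    have hnc : ¬ (p.2 = ',' ∧ depth = 0) := by
      rintro ⟨h', -⟩; rw [h'] at hc; simp [PySem.Chars.isspace] at hc
    have hn1 : ¬ (p.2 = '(' ∨ p.2 = '{' ∨ p.2 = '[') := by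
      rintro (h' | h' | h') <;> (rw [h'] at hc; simp [PySem.Chars.isspace] at hc)
    have hn2 : ¬ (p.2 = ')' ∨ p.2 = '}' ∨ p.2 = ']') := by
      rintro (h' | h' | h') <;> (rw [h'] at hc; simp [PySem.Chars.isspace] at hc)
    simp only [List.foldl_cons]
    rw [show pvStep1 (depth, cuts) p = (depth, cuts) from by
      obtain ⟨i, c⟩ := p; simp only [pvStep1, if_neg hnc, if_neg hn1, if_neg hn2]]
    exact ih depth cuts (fun x hx => h x (by simp [hx]))

lemma pvStrip_nil_all_ws (cs : List Char) (h : PySem.Chars.strip cs = []) :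
    ∀ c ∈ cs, PySem.Chars.isspace c = true := by
  simp only [PySem.Chars.strip, PySem.Chars.rstrip, PySem.Chars.lstrip] at h
  have h1 : (cs.dropWhile PySem.Chars.isspace).reverse.dropWhile PySem.Chars.isspace = [] := by
    simpa using congrArg List.reverse h
  have h2 : ∀ x ∈ (cs.dropWhile PySem.Chars.isspace).reverse, PySem.Chars.isspace x = true := by
    simpa using List.dropWhile_eq_nil_iff.mp h1
  intro c hc
  rw [← List.takeWhile_append_dropWhile (p := PySem.Chars.isspace) (l := cs)] at hc
  rcases List.mem_append.mp hc with h3 | h3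
  · exact List.mem_takeWhile_imp h3
  · exact h2 c (List.mem_reverse.mpr h3)

-- ===== VERDICT (by name: the statement is the Claim_ definition above) =====
theorem parse_js_params_py_spec : Claim_equal_parse_js_params_py := by
  intro s _
  unfold Spec_parse_js_params_py
  by_cases hg : PySem.Str.strip s = ""
  · have hnil : PySem.Chars.strip s.toList = [] := by
      have := congrArg String.toList hg
      simpa using this
    have hws : ∀ p ∈ PySem.List.enumerate s.toList 0, PySem.Chars.isspace p.2 = true := by
      intro p hp
      rw [PySem.List.mem_enumerate_iff] at hp
      obtain ⟨j, hj, rfl⟩ := hp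
      exact pvStrip_nil_all_ws _ hnil _ (List.getElem_mem hj)
    have hB : parse_js_params_py_alt s = [] := by
      unfold parse_js_params_py_alt
      dsimp only
      rw [pvFold_ws _ 0 [-1] hws]
      simp only [List.cons_append, List.nil_append, List.tail_cons, List.zip_cons_cons,
        List.zip_nil_right, pvOut, List.foldl_cons, List.foldl_nil]
      rw [show (-1 : Int) + 1 = ((0 : Nat) : Int) from by norm_num, PySem.List.slice_natCast]
      simp only [Nat.sub_zero, List.drop_zero, List.take_length, hnil]
      simp
    rw [hB]
    unfold parse_js_params_py
    rw [if_pos hg]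
  · obtain ⟨k', S, hS, hlast, h0, hle, he⟩ :=
      pvLockstep s.toList s.toList 0 0 [-1] (-1) (by simp) (by simp) (by norm_num) (by simp)
    rw [show ((0 : Nat) : Int) = (0 : Int) from by norm_num] at hS
    simp only [List.take_zero, List.drop_nil, List.zip_nil_right, List.tail_cons,
      Nat.zero_add, List.take_length] at he
    rw [show pvOut s.toList [] = [] from rfl] at he
    have hslice : PySem.Chars.strip (PySem.List.slice s.toList (some (k' + 1)) (some (s.toList.length : Int)))
        = PySem.Chars.strip (s.toList.drop (k' + 1).toNat) := by
      rw [PySem.List.slice_toNat _ h0 (by positivity)]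
      rw [List.take_of_length_le (by simp)]
    have hB : parse_js_params_py_alt s
        = pvOut s.toList (S.2.zip S.2.tail) ++
            (if PySem.Chars.strip (s.toList.drop (k' + 1).toNat) ≠ [] then
              [pvNameOf (PySem.Chars.strip (s.toList.drop (k' + 1).toNat))] else []) := by
      unfold parse_js_params_py_alt
      dsimp only
      rw [hS, pvZip_last _ k' _ hlast, pvOut_append_one]
      simp only [hslice]
    rw [hB]
    unfold parse_js_params_py
    rw [if_neg hg]
    dsimp only
    rw [he]
    split_ifs <;> simp_all
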